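-- pv_equiv track=rewrite | github.com/Drakaniia/python-automation | automation/github/commit_summarizer.py | _infer_intent_heuristic
-- ===== SOURCE A (Python) =====
-- from typing import Dict, List, Tuple, Optional
--
-- def _infer_intent_heuristic(commit: Dict) -> str:
--     """Infer intent from commit message (heuristic)"""
--     msg = commit['message'].lower()
--
--     if any(kw in msg for kw in ['fix', 'bug', 'patch']):
--         return "Bug fix or error correction"
--     elif any(kw in msg for kw in ['add', 'new', 'feature', 'implement']):
--         return "New feature implementation"
--     elif any(kw in msg for kw in ['refactor', 'clean', 'improve']):
--         return "Code refactoring and improvements"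
--     elif any(kw in msg for kw in ['update', 'change', 'modify']):
--         return "Updates to existing functionality"
--     elif any(kw in msg for kw in ['doc', 'readme', 'comment']):
--         return "Documentation updates"
--     else:
--         return "General code changes"
-- ===== SOURCE B (Python) =====
-- LABELS = [
--     "Bug fix or error correction",
--     "New feature implementation",
--     "Code refactoring and improvements",
--     "Updates to existing functionality",
--     "Documentation updates",
--     "General code changes",
-- ]
--
-- KEYWORD_CATEGORY = {
--     'fix': 0, 'bug': 0, 'patch': 0,
--     'add': 1, 'new': 1, 'feature': 1, 'implement': 1,
--     'refactor': 2, 'clean': 2, 'improve': 2,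
--     'update': 3, 'change': 3, 'modify': 3,
--     'doc': 4, 'readme': 4, 'comment': 4,
-- }
--
-- def _infer_intent_heuristic(commit):
--     # One left-to-right scan of the message: at each position, see which
--     # keywords start there and keep the minimum (highest-priority) category.
--     msg = commit['message'].lower()
--     best = 5
--     s = msg
--     while s:
--         for kw, cat in KEYWORD_CATEGORY.items():
--             if s.startswith(kw):
--                 best = min(best, cat)
--         s = s[1:]
--     return LABELS[best]
-- ===== Notes on version B (the rewrite author's own statement) =====
-- stated objective: alternative
-- what changed: Instead of running a per-rule substring-search cascade, B makes one left-to-right scan over the message positions, maps each keyword starting at a position to its category number, keeps the running minimum category, and finally looks the answer up in a label table; the minimum matched category equals the first cascade rule that fires.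
import Mathlib
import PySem

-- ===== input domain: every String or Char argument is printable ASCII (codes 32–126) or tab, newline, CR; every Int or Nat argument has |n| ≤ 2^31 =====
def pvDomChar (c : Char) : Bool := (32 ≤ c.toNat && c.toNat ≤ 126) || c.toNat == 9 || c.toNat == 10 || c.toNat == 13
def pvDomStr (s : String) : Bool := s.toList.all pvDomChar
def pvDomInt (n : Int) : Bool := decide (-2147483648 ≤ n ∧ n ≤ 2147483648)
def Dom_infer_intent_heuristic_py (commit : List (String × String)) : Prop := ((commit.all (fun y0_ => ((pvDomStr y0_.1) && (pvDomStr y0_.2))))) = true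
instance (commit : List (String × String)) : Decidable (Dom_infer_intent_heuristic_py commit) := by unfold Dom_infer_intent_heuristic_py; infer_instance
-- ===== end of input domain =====

-- B replaces A's per-rule substring-search cascade by a single left-to-right scan over the
-- message positions keeping the minimum matched category, then one label-table lookup
-- (alternative algorithm, same cost).

-- ===== PORT A =====
-- literal transliteration of the if/elif cascade of keyword `any` tests
def infer_intent_heuristic_py (commit : List (String × String)) : String :=
  let msg := PySem.Str.lower (((PySem.Dict.mk commit).get? "message").getD "")
  if ["fix", "bug", "patch"].any (fun kw => PySem.Str.isIn kw msg) then
    "Bug fix or error correction"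
  else if ["add", "new", "feature", "implement"].any (fun kw => PySem.Str.isIn kw msg) then
    "New feature implementation"
  else if ["refactor", "clean", "improve"].any (fun kw => PySem.Str.isIn kw msg) then
    "Code refactoring and improvements"
  else if ["update", "change", "modify"].any (fun kw => PySem.Str.isIn kw msg) then
    "Updates to existing functionality"
  else if ["doc", "readme", "comment"].any (fun kw => PySem.Str.isIn kw msg) then
    "Documentation updates"
  else
    "General code changes"

-- ===== PORT B =====
-- KEYWORD_CATEGORY of Source B (insertion order preserved)
def pvKwCat : List (List Char × Nat) :=
  [ ("fix".toList, 0), ("bug".toList, 0), ("patch".toList, 0),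
    ("add".toList, 1), ("new".toList, 1), ("feature".toList, 1), ("implement".toList, 1),
    ("refactor".toList, 2), ("clean".toList, 2), ("improve".toList, 2),
    ("update".toList, 3), ("change".toList, 3), ("modify".toList, 3),
    ("doc".toList, 4), ("readme".toList, 4), ("comment".toList, 4) ]

-- LABELS of Source B
def pvLabels : List String :=
  [ "Bug fix or error correction",
    "New feature implementation",
    "Code refactoring and improvements",
    "Updates to existing functionality",
    "Documentation updates",
    "General code changes" ]

-- the while-loop of Source B: scan suffixes s, s[1:], …; at each, fold the dict items,
-- taking min(best, cat) whenever s.startswith(kw) (exact: startswith = list prefix on ASCII)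
def pvBestOf : List Char → Nat → Nat
  | [], best => best
  | c :: rest, best =>
      pvBestOf rest
        (pvKwCat.foldl (fun b r => if r.1.isPrefixOf (c :: rest) then min b r.2 else b) best)

-- literal transliteration of Source B (LABELS[best]: best ≤ 5 always, so the lookup is in range)
def infer_intent_heuristic_py_alt (commit : List (String × String)) : String :=
  let msg := PySem.Str.lower (((PySem.Dict.mk commit).get? "message").getD "")
  pvLabels.getD (pvBestOf msg.toList 5) ""

-- ===== PRECONDITION & SPEC =====
-- Pre_ excludes only commits without a "message" key, on which A (and B) raise KeyError.
def Pre_infer_intent_heuristic_py (commit : List (String × String)) : Prop :=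
  "message" ∈ commit.map Prod.fst
instance (commit : List (String × String)) : Decidable (Pre_infer_intent_heuristic_py commit) := by unfold Pre_infer_intent_heuristic_py; infer_instance
def pvWitness_infer_intent_heuristic_py : (List (String × String)) := [("message", "fix the bug")]
def Spec_infer_intent_heuristic_py (commit : List (String × String)) (out : String) : Prop := out = infer_intent_heuristic_py_alt commit
instance (commit : List (String × String)) (out : String) : Decidable (Spec_infer_intent_heuristic_py commit out) := by unfold Spec_infer_intent_heuristic_py; infer_instance

-- ===== CLAIM (what is proved, stated in full; the proofs are below) =====
def Claim_equal_infer_intent_heuristic_py : Prop := ∀ (commit : List (String × String)), Dom_infer_intent_heuristic_py commit → Pre_infer_intent_heuristic_py commit → Spec_infer_intent_heuristic_py commit (infer_intent_heuristic_py commit)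

-- ===== LEMMAS AND PROOFS =====

-- the inner (dict) fold only decreases the accumulator
lemma inner_le (tbl : List (List Char × Nat)) (s : List Char) (b : Nat) :
    tbl.foldl (fun b r => if r.1.isPrefixOf s then min b r.2 else b) b ≤ b := by
  induction tbl generalizing b with
  | nil => simp
  | cons r t ih =>
      simp only [List.foldl]
      refine le_trans (ih _) ?_
      split <;> simp

lemma inner_le_of_mem (tbl : List (List Char × Nat)) (s : List Char) (r : List Char × Nat)
    (hr : r ∈ tbl) (hp : r.1.isPrefixOf s = true) (b : Nat) :
    tbl.foldl (fun b r => if r.1.isPrefixOf s then min b r.2 else b) b ≤ r.2 := by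
  induction tbl generalizing b with
  | nil => cases hr
  | cons q t ih =>
      simp only [List.foldl]
      rcases List.mem_cons.1 hr with h | h
      · subst h
        refine le_trans (inner_le _ _ _) ?_
        rw [if_pos hp]; exact min_le_right _ _
      · exact ih h _

lemma inner_eq_or (tbl : List (List Char × Nat)) (s : List Char) (b : Nat) :
    tbl.foldl (fun b r => if r.1.isPrefixOf s then min b r.2 else b) b = b ∨
    ∃ r ∈ tbl, r.1.isPrefixOf s = true ∧
      tbl.foldl (fun b r => if r.1.isPrefixOf s then min b r.2 else b) b = r.2 := by
  induction tbl generalizing b with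
  | nil => left; rfl
  | cons q t ih =>
      simp only [List.foldl]
      by_cases hq : q.1.isPrefixOf s = true
      · rw [if_pos hq]
        rcases ih (min b q.2) with h | ⟨r, hr, hp, he⟩
        · rcases min_cases b q.2 with ⟨hm, _⟩ | ⟨hm, _⟩
          · left; rw [h, hm]
          · right; exact ⟨q, List.mem_cons_self .., hq, by rw [h, hm]⟩
        · right; exact ⟨r, List.mem_cons_of_mem _ hr, hp, he⟩
      · rw [if_neg hq]
        rcases ih b with h | ⟨r, hr, hp, he⟩
        · left; exact h
        · right; exact ⟨r, List.mem_cons_of_mem _ hr, hp, he⟩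

lemma bestOf_le (s : List Char) (b : Nat) : pvBestOf s b ≤ b := by
  induction s generalizing b with
  | nil => simp [pvBestOf]
  | cons c t ih => exact le_trans (ih _) (inner_le _ _ _)

lemma bestOf_le_of_suffix (r : List Char × Nat) (hr : r ∈ pvKwCat) (hne : r.1 ≠ [])
    (t : List Char) (hpre : r.1 <+: t) :
    ∀ (s : List Char), t <:+ s → ∀ b, pvBestOf s b ≤ r.2 := by
  intro s
  induction s with
  | nil =>
      intro hsuf _
      have ht : t = [] := List.suffix_nil.1 hsuf
      subst ht
      exact absurd (List.prefix_nil.1 hpre) hne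
  | cons c rest ih =>
      intro hsuf b
      rcases List.suffix_cons_iff.1 hsuf with h | h
      · have hp : r.1.isPrefixOf (c :: rest) = true := by
          rw [List.isPrefixOf_iff_prefix, ← h]; exact hpre
        show pvBestOf rest _ ≤ r.2
        exact le_trans (bestOf_le _ _) (inner_le_of_mem _ _ _ hr hp _)
      · exact ih h _

lemma bestOf_le_of_infix (r : List Char × Nat) (hr : r ∈ pvKwCat) (hne : r.1 ≠ [])
    (s : List Char) (hinf : r.1 <:+: s) (b : Nat) : pvBestOf s b ≤ r.2 := by
  rcases List.infix_iff_prefix_suffix.1 hinf with ⟨t, hpre, hsuf⟩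
  exact bestOf_le_of_suffix r hr hne t hpre s hsuf b

lemma bestOf_eq_or (s : List Char) (b : Nat) :
    pvBestOf s b = b ∨ ∃ r ∈ pvKwCat, r.1 <:+: s ∧ pvBestOf s b = r.2 := by
  induction s generalizing b with
  | nil => left; rfl
  | cons c rest ih =>
      simp only [pvBestOf]
      rcases ih (pvKwCat.foldl (fun b r => if r.1.isPrefixOf (c :: rest) then min b r.2 else b) b)
        with h | ⟨r, hr, hinf, he⟩
      · rw [h]
        rcases inner_eq_or pvKwCat (c :: rest) b with h2 | ⟨r, hr, hp, he⟩
        · left; exact h2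
        · right
          exact ⟨r, hr, (List.isPrefixOf_iff_prefix.1 hp).isInfix, he⟩
      · right
        exact ⟨r, hr, List.infix_cons hinf, he⟩

-- if no table entry of category k matches, the scan result is not k (k ≠ 5)
lemma ne_of_no_match (s : List Char) (k : Nat) (h5 : k ≠ 5)
    (h : ∀ r ∈ pvKwCat, r.2 = k → ¬ r.1 <:+: s) : pvBestOf s 5 ≠ k := by
  intro hk
  rcases bestOf_eq_or s 5 with h2 | ⟨r, hr, hinf, he⟩
  · exact h5 (hk ▸ h2.symm ▸ rfl)
  · exact h r hr (he ▸ hk) hinf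

-- the main per-message equality: A's cascade equals B's scan + lookup
lemma cascade_eq_scan (msg : String) :
    (if ["fix", "bug", "patch"].any (fun kw => PySem.Str.isIn kw msg) then
      "Bug fix or error correction"
    else if ["add", "new", "feature", "implement"].any (fun kw => PySem.Str.isIn kw msg) then
      "New feature implementation"
    else if ["refactor", "clean", "improve"].any (fun kw => PySem.Str.isIn kw msg) then
      "Code refactoring and improvements"
    else if ["update", "change", "modify"].any (fun kw => PySem.Str.isIn kw msg) then
      "Updates to existing functionality"
    else if ["doc", "readme", "comment"].any (fun kw => PySem.Str.isIn kw msg) then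
      "Documentation updates"
    else
      "General code changes") = pvLabels.getD (pvBestOf msg.toList 5) "" := by
  simp only [List.any_cons, List.any_nil, Bool.or_false, Bool.or_eq_true,
    PySem.Str.isIn_iff_infix]
  by_cases h0 : "fix".toList <:+: msg.toList ∨ "bug".toList <:+: msg.toList ∨
      "patch".toList <:+: msg.toList
  · have hM : pvBestOf msg.toList 5 = 0 := Nat.le_zero.1 (by
      rcases h0 with h | h | h
      · exact bestOf_le_of_infix ("fix".toList, 0) (by decide) (by decide) _ h 5
      · exact bestOf_le_of_infix ("bug".toList, 0) (by decide) (by decide) _ h 5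
      · exact bestOf_le_of_infix ("patch".toList, 0) (by decide) (by decide) _ h 5)
    rw [if_pos h0, hM]; rfl
  rw [if_neg h0]
  have n0 : ∀ r ∈ pvKwCat, r.2 = 0 → ¬ r.1 <:+: msg.toList := by
    intro r hr hcat
    push Not at h0
    fin_cases hr <;> first
      | exact absurd hcat (by decide)
      | exact h0.1 | exact h0.2.1 | exact h0.2.2
  have m0 : pvBestOf msg.toList 5 ≠ 0 := ne_of_no_match _ 0 (by decide) n0
  by_cases h1 : "add".toList <:+: msg.toList ∨ "new".toList <:+: msg.toList ∨
      "feature".toList <:+: msg.toList ∨ "implement".toList <:+: msg.toList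
  · have hle : pvBestOf msg.toList 5 ≤ 1 := by
      rcases h1 with h | h | h | h
      · exact bestOf_le_of_infix ("add".toList, 1) (by decide) (by decide) _ h 5
      · exact bestOf_le_of_infix ("new".toList, 1) (by decide) (by decide) _ h 5
      · exact bestOf_le_of_infix ("feature".toList, 1) (by decide) (by decide) _ h 5
      · exact bestOf_le_of_infix ("implement".toList, 1) (by decide) (by decide) _ h 5
    have hM : pvBestOf msg.toList 5 = 1 := by omega
    rw [if_pos h1, hM]; rfl
  rw [if_neg h1]
  have n1 : ∀ r ∈ pvKwCat, r.2 = 1 → ¬ r.1 <:+: msg.toList := by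
    intro r hr hcat
    push Not at h1
    fin_cases hr <;> first
      | exact absurd hcat (by decide)
      | exact h1.1 | exact h1.2.1 | exact h1.2.2.1 | exact h1.2.2.2
  have m1 : pvBestOf msg.toList 5 ≠ 1 := ne_of_no_match _ 1 (by decide) n1
  by_cases h2 : "refactor".toList <:+: msg.toList ∨ "clean".toList <:+: msg.toList ∨
      "improve".toList <:+: msg.toList
  · have hle : pvBestOf msg.toList 5 ≤ 2 := by
      rcases h2 with h | h | h
      · exact bestOf_le_of_infix ("refactor".toList, 2) (by decide) (by decide) _ h 5
      · exact bestOf_le_of_infix ("clean".toList, 2) (by decide) (by decide) _ h 5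
      · exact bestOf_le_of_infix ("improve".toList, 2) (by decide) (by decide) _ h 5
    have hM : pvBestOf msg.toList 5 = 2 := by omega
    rw [if_pos h2, hM]; rfl
  rw [if_neg h2]
  have n2 : ∀ r ∈ pvKwCat, r.2 = 2 → ¬ r.1 <:+: msg.toList := by
    intro r hr hcat
    push Not at h2
    fin_cases hr <;> first
      | exact absurd hcat (by decide)
      | exact h2.1 | exact h2.2.1 | exact h2.2.2
  have m2 : pvBestOf msg.toList 5 ≠ 2 := ne_of_no_match _ 2 (by decide) n2
  by_cases h3 : "update".toList <:+: msg.toList ∨ "change".toList <:+: msg.toList ∨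
      "modify".toList <:+: msg.toList
  · have hle : pvBestOf msg.toList 5 ≤ 3 := by
      rcases h3 with h | h | h
      · exact bestOf_le_of_infix ("update".toList, 3) (by decide) (by decide) _ h 5
      · exact bestOf_le_of_infix ("change".toList, 3) (by decide) (by decide) _ h 5
      · exact bestOf_le_of_infix ("modify".toList, 3) (by decide) (by decide) _ h 5
    have hM : pvBestOf msg.toList 5 = 3 := by omega
    rw [if_pos h3, hM]; rfl
  rw [if_neg h3]
  have n3 : ∀ r ∈ pvKwCat, r.2 = 3 → ¬ r.1 <:+: msg.toList := by
    intro r hr hcat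
    push Not at h3
    fin_cases hr <;> first
      | exact absurd hcat (by decide)
      | exact h3.1 | exact h3.2.1 | exact h3.2.2
  have m3 : pvBestOf msg.toList 5 ≠ 3 := ne_of_no_match _ 3 (by decide) n3
  by_cases h4 : "doc".toList <:+: msg.toList ∨ "readme".toList <:+: msg.toList ∨
      "comment".toList <:+: msg.toList
  · have hle : pvBestOf msg.toList 5 ≤ 4 := by
      rcases h4 with h | h | h
      · exact bestOf_le_of_infix ("doc".toList, 4) (by decide) (by decide) _ h 5
      · exact bestOf_le_of_infix ("readme".toList, 4) (by decide) (by decide) _ h 5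
      · exact bestOf_le_of_infix ("comment".toList, 4) (by decide) (by decide) _ h 5
    have hM : pvBestOf msg.toList 5 = 4 := by omega
    rw [if_pos h4, hM]; rfl
  rw [if_neg h4]
  have n4 : ∀ r ∈ pvKwCat, r.2 = 4 → ¬ r.1 <:+: msg.toList := by
    intro r hr hcat
    push Not at h4
    fin_cases hr <;> first
      | exact absurd hcat (by decide)
      | exact h4.1 | exact h4.2.1 | exact h4.2.2
  have m4 : pvBestOf msg.toList 5 ≠ 4 := ne_of_no_match _ 4 (by decide) n4
  have hM : pvBestOf msg.toList 5 = 5 := by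
    rcases bestOf_eq_or msg.toList 5 with h | ⟨r, hr, hinf, he⟩
    · exact h
    · exfalso
      have hcat : r.2 ≤ 4 := by fin_cases hr <;> decide
      have : r.2 = 0 ∨ r.2 = 1 ∨ r.2 = 2 ∨ r.2 = 3 ∨ r.2 = 4 := by omega
      rcases this with h | h | h | h | h
      · exact n0 r hr h hinf
      · exact n1 r hr h hinf
      · exact n2 r hr h hinf
      · exact n3 r hr h hinf
      · exact n4 r hr h hinf
  rw [hM]; rfl

-- ===== VERDICT (by name: the statement is the Claim_ definition above) =====
theorem infer_intent_heuristic_py_spec : Claim_equal_infer_intent_heuristic_py := by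
  intro commit _ _
  unfold Spec_infer_intent_heuristic_py infer_intent_heuristic_py infer_intent_heuristic_py_alt
  exact cascade_eq_scan _
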